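-- pv_equiv track=rewrite | github.com/aungminnkhant9400/RolloForge | rolloforge/telegram_ingest.py | _extract_x_handle
-- ===== SOURCE A (Python) =====
-- def _extract_x_handle(url: str) -> str:
--     """Extract X handle from URL."""
--     try:
--         # https://x.com/username/status/...
--         parts = url.split("/")
--         if "x.com" in url or "twitter.com" in url:
--             for i, part in enumerate(parts):
--                 if part in ("x.com", "twitter.com") and i + 1 < len(parts):
--                     return parts[i + 1]
--     except:
--         pass
--     return "unknown"
-- ===== SOURCE B (Python) =====
-- def _extract_x_handle(url: str) -> str:
--     # Boundary-to-boundary scan over the raw string: jump from one '/'-segment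
--     # start to the next instead of materialising the split list.
--     rest = url
--     while True:
--         for host in ("x.com/", "twitter.com/"):
--             if rest.startswith(host):
--                 tail = rest[len(host):]
--                 cut = tail.find("/")
--                 return tail if cut == -1 else tail[:cut]
--         cut = rest.find("/")
--         if cut == -1:
--             return "unknown"
--         rest = rest[cut + 1:]
-- ===== Notes on version B (the rewrite author's own statement) =====
-- stated objective: alternative
-- what changed: B replaces A's split-into-list + enumerate scan (with a redundant substring pre-check) by a boundary-to-boundary string scan that jumps from one '/'-segment start to the next and slices the handle out directly.
import Mathlib
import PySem

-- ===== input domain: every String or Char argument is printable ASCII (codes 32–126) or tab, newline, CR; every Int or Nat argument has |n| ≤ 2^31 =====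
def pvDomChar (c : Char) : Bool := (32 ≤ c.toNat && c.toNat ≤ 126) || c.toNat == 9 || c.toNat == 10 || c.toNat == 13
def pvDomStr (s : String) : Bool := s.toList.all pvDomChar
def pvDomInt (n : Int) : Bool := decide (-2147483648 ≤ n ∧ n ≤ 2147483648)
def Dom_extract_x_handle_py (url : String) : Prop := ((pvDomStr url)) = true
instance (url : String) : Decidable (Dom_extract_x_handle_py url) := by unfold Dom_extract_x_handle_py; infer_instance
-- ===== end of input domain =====

-- B scans the raw string boundary-to-boundary instead of splitting into a list; return values agree with A everywhere.

-- ===== PORT A =====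
-- for i, part in enumerate(parts): first matching segment returns parts[i+1]
-- (pyGet? = none is the unreachable IndexError, absorbed by A's bare 'except: pass' → "unknown")
def pvLoopA : List (Int × String) → List String → String
  | [], _ => "unknown"
  | (i, part) :: rest, parts =>
    if (part == "x.com" || part == "twitter.com") && decide (i + 1 < (parts.length : Int)) then
      match PySem.List.pyGet? parts (i + 1) with
      | some v => v
      | none => "unknown"
    else pvLoopA rest parts

def extract_x_handle_py (url : String) : String :=
  match PySem.Str.split? url "/" with
  | none => "unknown"          -- unreachable: the separator "/" is nonempty
  | some parts =>
    if PySem.Str.isIn "x.com" url || PySem.Str.isIn "twitter.com" url then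
      pvLoopA (PySem.List.enumerate parts) parts
    else "unknown"

-- ===== PORT B =====
-- tail = rest[len(host):]; cut = tail.find("/"); return tail if cut == -1 else tail[:cut]
def pvCapture (tail : List Char) : List Char :=
  let cut := PySem.Chars.find tail ['/']
  if cut = -1 then tail else PySem.Chars.slice tail none (some cut)

-- the while-loop of B: the for-loop over the two hosts is unrolled into two ifs
def pvScan (rest : List Char) : List Char :=
  if PySem.Chars.startswith rest "x.com/".toList then
    pvCapture (PySem.Chars.slice rest (some 6) none)
  else if PySem.Chars.startswith rest "twitter.com/".toList then
    pvCapture (PySem.Chars.slice rest (some 12) none)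
  else
    let cut := PySem.Chars.find rest ['/']
    if h : cut = -1 then "unknown".toList
    else pvScan (PySem.Chars.slice rest (some (cut + 1)) none)
termination_by rest.length
decreasing_by
  have h0 : (0:Int) ≤ PySem.Chars.find rest ['/'] := by
    have := PySem.Chars.neg_one_le_find rest ['/']; omega
  have hinf : ['/'] <:+: rest := (PySem.Chars.find_nonneg_iff rest ['/']).mp h0
  have hne : rest ≠ [] := by
    rcases hinf with ⟨s, t, hst⟩; intro hnil; simp [hnil] at hst
  rw [PySem.Chars.slice_eq_listSlice, PySem.List.slice_from rest (by omega : (0:Int) ≤ PySem.Chars.find rest ['/'] + 1)]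
  have hlen : rest.length ≠ 0 := by simpa using fun hh => hne (List.length_eq_zero_iff.mp hh)
  have : 1 ≤ (PySem.Chars.find rest ['/'] + 1).toNat := by omega
  simp only [List.length_drop]; omega

def extract_x_handle_py_alt (url : String) : String :=
  String.ofList (pvScan url.toList)

-- ===== PRECONDITION & SPEC =====
def Spec_extract_x_handle_py (url : String) (out : String) : Prop := out = extract_x_handle_py_alt url
instance (url : String) (out : String) : Decidable (Spec_extract_x_handle_py url out) := by unfold Spec_extract_x_handle_py; infer_instance

-- ===== CLAIM (what is proved, stated in full; the proofs are below) =====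
def Claim_equal_extract_x_handle_py : Prop := ∀ (url : String), Dom_extract_x_handle_py url → Spec_extract_x_handle_py url (extract_x_handle_py url)

-- ===== LEMMAS AND PROOFS =====

-- the segments of cs under '/'-splitting (reference model for both ports)
def pvSegs : List Char → List (List Char)
  | [] => [[]]
  | c :: rest =>
    if c = '/' then [] :: pvSegs rest
    else (c :: (pvSegs rest).headI) :: (pvSegs rest).tail

-- first segment equal to a host and followed by another segment; that next segment
def pvFind : List (List Char) → List Char
  | [] => "unknown".toList
  | p :: ps =>
    if (p = "x.com".toList ∨ p = "twitter.com".toList) ∧ ps ≠ [] then ps.headI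
    else pvFind ps

-- string-level twin of pvFind
def pvFindS : List String → String
  | [] => "unknown"
  | p :: ps =>
    if (p = "x.com" ∨ p = "twitter.com") ∧ ps ≠ [] then ps.headI
    else pvFindS ps

theorem pvSegs_ne_nil (cs : List Char) : pvSegs cs ≠ [] := by
  cases cs with
  | nil => simp [pvSegs]
  | cons c rest => by_cases h : c = '/' <;> simp [pvSegs, h]

theorem pvSegs_cons_headI_tail (cs : List Char) :
    (pvSegs cs).headI :: (pvSegs cs).tail = pvSegs cs := by
  cases h : pvSegs cs with
  | nil => exact absurd h (pvSegs_ne_nil cs)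
  | cons a l => simp

theorem pv_go_spec : ∀ (fuel : Nat) (l cur : List Char) (hacc : List (List Char)),
    l.length < fuel →
    PySem.Chars.splitOn.go ['/'] fuel l cur hacc =
      hacc.reverse ++ (cur.reverse ++ (pvSegs l).headI) :: (pvSegs l).tail := by
  intro fuel
  induction fuel with
  | zero => intro l cur hacc h; omega
  | succ n ih =>
    intro l cur hacc h
    cases l with
    | nil =>
      rw [PySem.Chars.splitOn.go.eq_def]
      simp [pvSegs]
    | cons c rest =>
      rw [PySem.Chars.splitOn.go.eq_def]
      by_cases hc : c = '/'
      · subst hc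
        have hpre : List.isPrefixOf ['/'] ('/' :: rest) = true := by
          simp [List.isPrefixOf]
        simp only [hpre, if_pos, List.length_cons, List.drop_succ_cons, List.length_nil,
          List.drop_zero]
        rw [ih rest [] (cur.reverse :: hacc) (by simpa using Nat.lt_of_succ_lt_succ h)]
        rw [show pvSegs ('/' :: rest) = [] :: pvSegs rest from by simp [pvSegs]]
        simp [pvSegs_cons_headI_tail]
      · have hpre : List.isPrefixOf ['/'] (c :: rest) = false := by
          simp [List.isPrefixOf]; exact fun hh => hc hh.symm
        simp only [hpre]
        rw [if_neg (by simp)]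
        rw [ih rest (c :: cur) hacc (by simpa using Nat.lt_of_succ_lt_succ h)]
        rw [show pvSegs (c :: rest) = (c :: (pvSegs rest).headI) :: (pvSegs rest).tail from by
          simp [pvSegs, hc]]
        simp

theorem pv_splitOn_char (cs : List Char) :
    PySem.Chars.splitOn cs ['/'] = pvSegs cs := by
  rw [show PySem.Chars.splitOn cs ['/'] = PySem.Chars.splitOn.go ['/'] (cs.length + 1) cs [] []
    from rfl]
  rw [pv_go_spec (cs.length + 1) cs [] [] (by omega)]
  simp [pvSegs_cons_headI_tail]

theorem pv_headI_pvSegs (cs : List Char) :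
    (pvSegs cs).headI = cs.takeWhile (· ≠ '/') := by
  induction cs with
  | nil => simp [pvSegs]
  | cons c rest ih =>
    by_cases h : c = '/' <;> simp [pvSegs, h, ih]

theorem pv_pvSegs_no_slash (cs : List Char) (h : '/' ∉ cs) : pvSegs cs = [cs] := by
  induction cs with
  | nil => simp [pvSegs]
  | cons c rest ih =>
    simp only [List.mem_cons, not_or] at h
    simp [pvSegs, Ne.symm h.1, ih h.2]

theorem pv_pvSegs_append (s t : List Char) (h : '/' ∉ s) :
    pvSegs (s ++ '/' :: t) = s :: pvSegs t := by
  induction s with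
  | nil => simp [pvSegs]
  | cons c s ih =>
    simp only [List.mem_cons, not_or] at h
    simp [pvSegs, Ne.symm h.1, ih h.2]

theorem pv_mem_pvSegs_infix (cs x : List Char) (h : x ∈ pvSegs cs) : x <:+: cs := by
  induction cs generalizing x with
  | nil => simp [pvSegs] at h; simp [h]
  | cons c rest ih =>
    by_cases hc : c = '/'
    · subst hc
      rw [show pvSegs ('/' :: rest) = [] :: pvSegs rest from by simp [pvSegs],
        List.mem_cons] at h
      rcases h with h | h
      · simp [h]
      · exact (ih x h).trans (List.infix_cons (List.infix_refl rest))
    · simp only [pvSegs, if_neg hc, List.mem_cons] at h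
      rcases h with h | h
      · subst h
        refine List.IsPrefix.isInfix ?_
        rw [pv_headI_pvSegs]
        exact List.cons_prefix_cons.mpr ⟨rfl, List.takeWhile_prefix _⟩
      · have : x ∈ pvSegs rest := by
          have := pvSegs_cons_headI_tail rest
          rw [← this]; exact List.mem_cons_of_mem _ h
        exact (ih x this).trans (List.infix_cons (List.infix_refl rest))

theorem pv_singleton_infix_mem {a : Char} {l : List Char} : [a] <:+: l ↔ a ∈ l := by
  constructor
  · rintro ⟨s, t, rfl⟩; simp
  · intro h
    rcases List.mem_iff_append.mp h with ⟨s, t, rfl⟩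
    exact ⟨s, t, by simp⟩

theorem pv_take_eq_takeWhile {p : Char → Bool} : ∀ (l : List Char) (n : Nat),
    (hn : n < l.length) → (∀ i, (h : i < n) → p (l[i]'(by omega)) = true) → p (l[n]) = false →
    l.take n = l.takeWhile p := by
  intro l
  induction l with
  | nil => intro n hn; simp at hn
  | cons c rest ih =>
    intro n hn hall hfail
    cases n with
    | zero => simp at hfail; simp [hfail]
    | succ m =>
      have hc : p c = true := by have := hall 0 (by omega); simpa using this
      simp only [List.take_succ_cons, List.takeWhile_cons, hc, if_pos]
      rw [ih m (by simpa using hn) (fun i hi => by have := hall (i+1) (by omega); simpa using this)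
        (by simpa using hfail)]

theorem pv_find_facts (cs : List Char) (h0 : 0 ≤ PySem.Chars.find cs ['/']) :
    ∃ hk : (PySem.Chars.find cs ['/']).toNat < cs.length,
    cs[(PySem.Chars.find cs ['/']).toNat] = '/' ∧
    (∀ i, i < (PySem.Chars.find cs ['/']).toNat → ∀ hi : i < cs.length, cs[i] ≠ '/') := by
  obtain ⟨hpre, hmin⟩ := PySem.Chars.find_spec h0
  set k := (PySem.Chars.find cs ['/']).toNat with hkdef
  obtain ⟨t, ht⟩ : ∃ t, cs.drop k = '/' :: t := by rcases hpre with ⟨t, ht⟩; exact ⟨t, ht.symm⟩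
  have hk : k < cs.length := by
    by_contra hc
    rw [List.drop_eq_nil_of_le (by omega)] at ht; simp at ht
  refine ⟨hk, ?_, ?_⟩
  · have := List.drop_eq_getElem_cons hk
    rw [ht] at this
    exact (List.cons.injEq .. ▸ this).1.symm
  · intro i hi hil hc
    exact hmin i hi (by rw [List.drop_eq_getElem_cons hil, hc]; exact ⟨_, rfl⟩)

theorem pv_capture_eq (tail : List Char) :
    pvCapture tail = (pvSegs tail).headI := by
  rw [pv_headI_pvSegs]
  unfold pvCapture
  by_cases h : PySem.Chars.find tail ['/'] = -1
  · rw [if_pos h]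
    have hnin : '/' ∉ tail := fun hm =>
      ((PySem.Chars.find_eq_neg_one_iff tail ['/']).mp h) (pv_singleton_infix_mem.mpr hm)
    rw [List.takeWhile_eq_self_iff.mpr (fun x hx => by
      simp only [decide_eq_true_eq]; exact fun he => hnin (he ▸ hx))]
  · rw [if_neg h]
    have h0 : (0:Int) ≤ PySem.Chars.find tail ['/'] := by
      have := PySem.Chars.neg_one_le_find tail ['/']; omega
    obtain ⟨hk, hat, hbefore⟩ := pv_find_facts tail h0
    rw [PySem.Chars.slice_eq_listSlice, PySem.List.slice_to tail h0]
    exact pv_take_eq_takeWhile tail _ hk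
      (fun i hi => by simp only [decide_eq_true_eq]; exact hbefore i hi (by omega))
      (by simp [hat])

theorem pv_mem_take_slash {cs : List Char} {k : Nat}
    (hb : ∀ i, i < k → ∀ hi : i < cs.length, cs[i] ≠ '/') : '/' ∉ cs.take k := by
  intro hm
  obtain ⟨i, hi, hig⟩ := List.mem_take_iff_getElem.mp hm
  exact hb i (by omega) (by omega) hig

theorem pv_scan_eq (cs : List Char) : pvScan cs = pvFind (pvSegs cs) := by
  induction cs using pvScan.induct with
  | case1 cs h1 =>
    obtain ⟨rest, hr⟩ := (PySem.Chars.startswith_iff cs "x.com/".toList).mp h1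
    subst hr
    rw [pvScan, if_pos h1, pv_capture_eq]
    rw [show PySem.Chars.slice ("x.com/".toList ++ rest) (some 6) none = rest from by
      rw [PySem.Chars.slice_eq_listSlice, PySem.List.slice_from _ (by omega)]
      exact List.drop_left' (by decide)]
    rw [show ("x.com/".toList ++ rest : List Char) = "x.com".toList ++ '/' :: rest from rfl]
    rw [pv_pvSegs_append _ _ (by decide)]
    rw [pvFind, if_pos ⟨Or.inl rfl, pvSegs_ne_nil rest⟩]
  | case2 cs h1 h2 =>
    obtain ⟨rest, hr⟩ := (PySem.Chars.startswith_iff cs "twitter.com/".toList).mp h2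
    subst hr
    rw [pvScan, if_neg h1, if_pos h2, pv_capture_eq]
    rw [show PySem.Chars.slice ("twitter.com/".toList ++ rest) (some 12) none = rest from by
      rw [PySem.Chars.slice_eq_listSlice, PySem.List.slice_from _ (by omega)]
      exact List.drop_left' (by decide)]
    rw [show ("twitter.com/".toList ++ rest : List Char) = "twitter.com".toList ++ '/' :: rest
      from rfl]
    rw [pv_pvSegs_append _ _ (by decide)]
    rw [pvFind, if_pos ⟨Or.inr rfl, pvSegs_ne_nil rest⟩]
  | case3 cs h1 h2 cut hcut =>
    rw [pvScan, if_neg h1, if_neg h2]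
    rw [dif_pos (show PySem.Chars.find cs ['/'] = -1 from hcut)]
    have hnin : '/' ∉ cs := fun hm =>
      ((PySem.Chars.find_eq_neg_one_iff cs ['/']).mp hcut) (pv_singleton_infix_mem.mpr hm)
    rw [pv_pvSegs_no_slash cs hnin, pvFind, if_neg (by simp), pvFind]
  | case4 cs h1 h2 cut hcut ih =>
    rw [pvScan, if_neg h1, if_neg h2]
    rw [dif_neg (show ¬ PySem.Chars.find cs ['/'] = -1 from hcut)]
    have h0 : (0:Int) ≤ PySem.Chars.find cs ['/'] := by
      have := PySem.Chars.neg_one_le_find cs ['/']; omega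
    obtain ⟨hk, hat, hbefore⟩ := pv_find_facts cs h0
    set k := (PySem.Chars.find cs ['/']).toNat with hkdef
    have hdecomp : cs = cs.take k ++ '/' :: cs.drop (k + 1) := by
      conv_lhs => rw [← List.take_append_drop k cs]
      rw [List.drop_eq_getElem_cons hk, hat]
    have hslice : PySem.Chars.slice cs (some (PySem.Chars.find cs ['/'] + 1)) none
        = cs.drop (k + 1) := by
      rw [PySem.Chars.slice_eq_listSlice, PySem.List.slice_from _ (by omega)]
      congr 1; omega
    rw [hslice] at ih
    rw [hslice, ih]
    conv_rhs => rw [hdecomp]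
    rw [pv_pvSegs_append _ _ (pv_mem_take_slash hbefore)]
    rw [pvFind, if_neg ?hno]
    case hno =>
      rintro ⟨hhost | hhost, -⟩
      · exact h1 (by
          rw [PySem.Chars.startswith_iff, hdecomp, hhost]
          exact ⟨cs.drop (k + 1), rfl⟩)
      · exact h2 (by
          rw [PySem.Chars.startswith_iff, hdecomp, hhost]
          exact ⟨cs.drop (k + 1), rfl⟩)

theorem pv_loopA_spec : ∀ (suf pre : List String),
    pvLoopA (PySem.List.enumerate suf (pre.length : Int)) (pre ++ suf) = pvFindS suf := by
  intro suf
  induction suf with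
  | nil => intro pre; simp [PySem.List.enumerate_nil, pvLoopA, pvFindS]
  | cons p ps ih =>
    intro pre
    rw [PySem.List.enumerate_cons, pvLoopA, pvFindS]
    cases ps with
    | nil =>
      rw [if_neg (by simp), if_neg (by simp)]
      simp only [PySem.List.enumerate_nil]
      rw [show pvFindS ([] : List String) = "unknown" from rfl]
      rfl
    | cons q qs =>
      by_cases hhost : p = "x.com" ∨ p = "twitter.com"
      · rw [if_pos (by
          simp only [Bool.and_eq_true, Bool.or_eq_true, beq_iff_eq, decide_eq_true_eq]
          refine ⟨hhost, ?_⟩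
          simp only [List.length_append, List.length_cons]
          push_cast; omega)]
        rw [if_pos ⟨hhost, by simp⟩]
        have hidx : ((pre.length : Int) + 1) = (((pre.length + 1 : Nat)) : Int) := by push_cast; ring
        rw [hidx, PySem.List.pyGet?_natCast]
        rw [List.getElem?_append_right (by omega)]
        simp
      · rw [if_neg (by
          simp only [Bool.and_eq_true, Bool.or_eq_true, beq_iff_eq, decide_eq_true_eq]
          tauto)]
        rw [if_neg (by tauto)]
        have h1 : ((pre.length : Int) + 1) = (((pre ++ [p]).length : Nat) : Int) := by
          simp [List.length_append]
        have h2 : pre ++ p :: q :: qs = (pre ++ [p]) ++ q :: qs := by simp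
        rw [h1, h2]
        exact ih (pre ++ [p])

theorem pv_ofList_eq_iff (p : List Char) (t : String) :
    String.ofList p = t ↔ p = t.toList :=
  ⟨fun h => by rw [← h, String.toList_ofList], fun h => by rw [h, String.ofList_toList]⟩

theorem pv_findS_map (ss : List (List Char)) :
    pvFindS (ss.map String.ofList) = String.ofList (pvFind ss) := by
  induction ss with
  | nil =>
    show "unknown" = String.ofList "unknown".toList
    rw [String.ofList_toList]
  | cons p ps ih =>
    rw [List.map_cons, pvFindS, pvFind]
    by_cases hc : (p = "x.com".toList ∨ p = "twitter.com".toList) ∧ ps ≠ []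
    · rw [if_pos (by
        refine ⟨?_, by simpa using hc.2⟩
        rcases hc.1 with h | h
        · exact Or.inl ((pv_ofList_eq_iff p "x.com").mpr h)
        · exact Or.inr ((pv_ofList_eq_iff p "twitter.com").mpr h))]
      rw [if_pos hc]
      cases ps with
      | nil => exact absurd rfl hc.2
      | cons q qs => simp
    · rw [if_neg (by
        rw [not_and_or] at hc ⊢
        rcases hc with h | h
        · exact Or.inl (by
            rw [not_or] at h ⊢
            exact ⟨fun hh => h.1 ((pv_ofList_eq_iff p "x.com").mp hh),
                   fun hh => h.2 ((pv_ofList_eq_iff p "twitter.com").mp hh)⟩)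
        · exact Or.inr (by simpa using h))]
      rw [if_neg hc]
      exact ih

theorem pv_find_no_host (ss : List (List Char))
    (h : ∀ p ∈ ss, p ≠ "x.com".toList ∧ p ≠ "twitter.com".toList) :
    pvFind ss = "unknown".toList := by
  induction ss with
  | nil => simp [pvFind]
  | cons p ps ih =>
    have hp := h p (List.mem_cons_self ..)
    simp only [pvFind]
    rw [if_neg (by tauto)]
    exact ih (fun q hq => h q (List.mem_cons_of_mem _ hq))

-- ===== VERDICT (by name: the statement is the Claim_ definition above) =====
theorem extract_x_handle_py_spec : Claim_equal_extract_x_handle_py := by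
  intro url _
  unfold Spec_extract_x_handle_py extract_x_handle_py extract_x_handle_py_alt
  have hsplit : PySem.Str.split? url "/" = some ((pvSegs url.toList).map String.ofList) := by
    simp [PySem.Str.split?, PySem.Chars.split?,
      show ("/" : String).toList = ['/'] from rfl, pv_splitOn_char]
  rw [hsplit]
  change (if (PySem.Str.isIn "x.com" url || PySem.Str.isIn "twitter.com" url) = true then
      pvLoopA (PySem.List.enumerate (List.map String.ofList (pvSegs url.toList)))
        (List.map String.ofList (pvSegs url.toList))
    else "unknown") = String.ofList (pvScan url.toList)
  by_cases hg : (PySem.Str.isIn "x.com" url || PySem.Str.isIn "twitter.com" url) = true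
  · rw [if_pos hg]
    have hpre := pv_loopA_spec ((pvSegs url.toList).map String.ofList) []
    simp only [List.length_nil, Nat.cast_zero, List.nil_append] at hpre
    rw [hpre, pv_findS_map, pv_scan_eq]
  · rw [if_neg hg]
    rw [pv_scan_eq]
    simp only [Bool.or_eq_true, not_or, Bool.not_eq_true] at hg
    rw [pv_find_no_host (pvSegs url.toList) (fun p hp => ?_)]
    · exact (String.ofList_toList (s := "unknown")).symm
    constructor
    · intro hh
      have : PySem.Str.isIn "x.com" url = true := by
        rw [PySem.Str.isIn_iff_infix]
        exact hh ▸ pv_mem_pvSegs_infix url.toList p hp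
      rw [this] at hg; simp at hg
    · intro hh
      have : PySem.Str.isIn "twitter.com" url = true := by
        rw [PySem.Str.isIn_iff_infix]
        exact hh ▸ pv_mem_pvSegs_infix url.toList p hp
      rw [this] at hg; simp at hg
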